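-- pv_equiv track=rewrite | github.com/azharmateen/code-sparkle | code_sparkle/tracker.py | get_language_count
-- ===== SOURCE A (Python) =====
-- def get_language_count(commits: list) -> int:
--     """Count unique programming languages across all commits."""
--     all_exts = set()
--     code_exts = {".py", ".js", ".ts", ".tsx", ".jsx", ".java", ".kt", ".swift", ".go",
--                  ".rs", ".rb", ".php", ".c", ".cpp", ".h", ".cs", ".scala", ".r",
--                  ".lua", ".dart", ".vue", ".svelte", ".zig", ".nim", ".ex", ".exs",
--                  ".erl", ".hs", ".ml", ".clj", ".sh", ".sql"}
--     for c in commits: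
--         for ext in c.get("extensions", set()):
--             if ext in code_exts:
--                 all_exts.add(ext)
--     return len(all_exts)
-- ===== SOURCE B (Python) =====
-- def get_language_count(commits: list) -> int:
--     """Count unique programming languages across all commits."""
--     code_exts = {".py", ".js", ".ts", ".tsx", ".jsx", ".java", ".kt", ".swift", ".go",
--                  ".rs", ".rb", ".php", ".c", ".cpp", ".h", ".cs", ".scala", ".r",
--                  ".lua", ".dart", ".vue", ".svelte", ".zig", ".nim", ".ex", ".exs",
--                  ".erl", ".hs", ".ml", ".clj", ".sh", ".sql"}
--     return sum(1 for ext in code_exts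
--                if any(ext in c.get("extensions", set()) for c in commits))
-- ===== Notes on version B (the rewrite author's own statement) =====
-- stated objective: alternative
-- what changed: B inverts the iteration: instead of scanning commits and accumulating a deduplicating set, it iterates over the fixed 32 code extensions and counts those that occur in at least one commit (sum of an any-scan per extension), so no set is built at all.
import Mathlib
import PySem

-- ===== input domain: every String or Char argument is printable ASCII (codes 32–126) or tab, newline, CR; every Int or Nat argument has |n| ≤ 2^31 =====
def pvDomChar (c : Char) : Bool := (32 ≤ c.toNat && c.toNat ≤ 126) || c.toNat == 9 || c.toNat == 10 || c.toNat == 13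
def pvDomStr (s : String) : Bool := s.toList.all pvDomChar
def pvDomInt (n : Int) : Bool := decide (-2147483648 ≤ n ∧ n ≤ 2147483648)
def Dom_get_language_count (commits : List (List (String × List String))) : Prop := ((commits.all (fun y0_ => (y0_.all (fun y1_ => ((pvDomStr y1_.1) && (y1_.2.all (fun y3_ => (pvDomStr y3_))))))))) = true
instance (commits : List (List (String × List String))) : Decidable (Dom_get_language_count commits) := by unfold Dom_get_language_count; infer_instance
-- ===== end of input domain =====

-- B inverts the iteration: it counts, over the fixed 32 code extensions, those occurring in some commit,
-- instead of A's accumulating-set scan over commits (objective: alternative).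


-- the Python set literal of code extensions (shared data, used by both ports)
def pvCodeExts : PySem.Set String :=
  PySem.Set.ofList [".py", ".js", ".ts", ".tsx", ".jsx", ".java", ".kt", ".swift", ".go",
                    ".rs", ".rb", ".php", ".c", ".cpp", ".h", ".cs", ".scala", ".r",
                    ".lua", ".dart", ".vue", ".svelte", ".zig", ".nim", ".ex", ".exs",
                    ".erl", ".hs", ".ml", ".clj", ".sh", ".sql"]

-- ===== PORT A =====
-- for each commit, for each ext in c.get("extensions", set()): if ext in code_exts: all_exts.add(ext); return len
def get_language_count (commits : List (List (String × List String))) : Int :=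
  PySem.Set.len
    (commits.foldl
      (fun all_exts c =>
        ((PySem.Dict.mk c).getD "extensions" []).foldl
          (fun all_exts ext =>
            if PySem.Set.contains pvCodeExts ext then PySem.Set.add all_exts ext else all_exts)
          all_exts)
      PySem.Set.empty)

-- ===== PORT B =====
-- sum(1 for ext in code_exts if any(ext in c.get("extensions", set()) for c in commits))
-- (a count over the set's elements: order-independent, so consuming the Set's list is exact)
def get_language_count_alt (commits : List (List (String × List String))) : Int :=
  pvCodeExts.foldl
    (fun acc ext =>
      if commits.any (fun c => ((PySem.Dict.mk c).getD "extensions" []).contains ext)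
      then acc + 1 else acc)
    0

-- ===== PRECONDITION & SPEC =====
def Spec_get_language_count (commits : List (List (String × List String))) (out : Int) : Prop := out = get_language_count_alt commits
instance (commits : List (List (String × List String))) (out : Int) : Decidable (Spec_get_language_count commits out) := by unfold Spec_get_language_count; infer_instance

-- ===== CLAIM (what is proved, stated in full; the proofs are below) =====
def Claim_equal_get_language_count : Prop := ∀ (commits : List (List (String × List String))), Dom_get_language_count commits → Spec_get_language_count commits (get_language_count commits)

-- ===== LEMMAS AND PROOFS =====

def pvExts (c : List (String × List String)) : List String := (PySem.Dict.mk c).getD "extensions" []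

-- A's inner loop: conditional add of every element of l
theorem pvA_inner_mem (l : List String) (s : PySem.Set String) (x : String) :
    x ∈ l.foldl (fun t e => if PySem.Set.contains pvCodeExts e then PySem.Set.add t e else t) s ↔
      x ∈ s ∨ (x ∈ l ∧ x ∈ pvCodeExts) := by
  induction l generalizing s with
  | nil => simp
  | cons e l ih =>
    simp only [List.foldl_cons]
    cases h : PySem.Set.contains pvCodeExts e with
    | true =>
      have he : e ∈ pvCodeExts := (PySem.Set.contains_iff _ _).1 h
      simp only [if_true, ih, PySem.Set.mem_add, List.mem_cons]
      constructor
      · rintro ((h' | rfl) | ⟨h1, h2⟩)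
        · exact Or.inl h'
        · exact Or.inr ⟨Or.inl rfl, he⟩
        · exact Or.inr ⟨Or.inr h1, h2⟩
      · rintro (h' | ⟨(rfl | h1), h2⟩)
        · exact Or.inl (Or.inl h')
        · exact Or.inl (Or.inr rfl)
        · exact Or.inr ⟨h1, h2⟩
    | false =>
      have he : e ∉ pvCodeExts := fun hm => by
        rw [(PySem.Set.contains_iff pvCodeExts e).2 hm] at h; cases h
      simp only [Bool.false_eq_true, if_false, ih, List.mem_cons]
      constructor
      · rintro (h' | ⟨h1, h2⟩)
        · exact Or.inl h'
        · exact Or.inr ⟨Or.inr h1, h2⟩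
      · rintro (h' | ⟨(rfl | h1), h2⟩)
        · exact Or.inl h'
        · exact absurd h2 he
        · exact Or.inr ⟨h1, h2⟩

theorem pvA_inner_nodup (l : List String) (s : PySem.Set String) (h : s.Nodup) :
    (l.foldl (fun t e => if PySem.Set.contains pvCodeExts e then PySem.Set.add t e else t) s).Nodup := by
  induction l generalizing s with
  | nil => exact h
  | cons e l ih =>
    simp only [List.foldl_cons]
    split
    · exact ih _ (PySem.Set.nodup_add s e h)
    · exact ih _ h

theorem pvA_mem (commits : List (List (String × List String))) (s : PySem.Set String) (x : String) :
    x ∈ commits.foldl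
        (fun all c => (pvExts c).foldl
          (fun t e => if PySem.Set.contains pvCodeExts e then PySem.Set.add t e else t) all) s ↔
      x ∈ s ∨ ∃ c ∈ commits, x ∈ pvExts c ∧ x ∈ pvCodeExts := by
  induction commits generalizing s with
  | nil => simp
  | cons c cs ih =>
    simp only [List.foldl_cons, ih, pvA_inner_mem, List.mem_cons]
    constructor
    · rintro ((h | ⟨h1, h2⟩) | ⟨c', hc', h1, h2⟩)
      · exact Or.inl h
      · exact Or.inr ⟨c, Or.inl rfl, h1, h2⟩
      · exact Or.inr ⟨c', Or.inr hc', h1, h2⟩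
    · rintro (h | ⟨c', (rfl | hc'), h1, h2⟩)
      · exact Or.inl (Or.inl h)
      · exact Or.inl (Or.inr ⟨h1, h2⟩)
      · exact Or.inr ⟨c', hc', h1, h2⟩

theorem pvA_nodup (commits : List (List (String × List String))) (s : PySem.Set String) (h : s.Nodup) :
    (commits.foldl
      (fun all c => (pvExts c).foldl
        (fun t e => if PySem.Set.contains pvCodeExts e then PySem.Set.add t e else t) all) s).Nodup := by
  induction commits generalizing s with
  | nil => exact h
  | cons c cs ih => exact ih _ (pvA_inner_nodup _ _ h)

-- B's fold counts the elements satisfying the predicate: it equals filter-length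
theorem pvB_count (p : String → Bool) (l : List String) (acc : Int) :
    l.foldl (fun a x => if p x then a + 1 else a) acc = acc + ((l.filter p).length : Int) := by
  induction l generalizing acc with
  | nil => simp
  | cons x l ih =>
    simp only [List.foldl_cons, List.filter_cons]
    cases h : p x
    · simp only [Bool.false_eq_true, if_false, ih]
    · simp only [if_true, ih, List.length_cons]
      push_cast
      ring

-- ===== VERDICT (by name: the statement is the Claim_ definition above) =====
theorem get_language_count_spec : Claim_equal_get_language_count := by
  intro commits _
  unfold Spec_get_language_count get_language_count get_language_count_alt
  rw [pvB_count]
  unfold PySem.Set.len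
  simp only [Int.zero_add, Int.natCast_inj]
  have hA := pvA_nodup commits PySem.Set.empty List.nodup_nil
  have hB : (pvCodeExts.filter
      (fun ext => commits.any (fun c => ((PySem.Dict.mk c).getD "extensions" []).contains ext))).Nodup :=
    List.Nodup.filter _ (by unfold pvCodeExts; exact PySem.Set.nodup_ofList _)
  have hperm : (commits.foldl
      (fun all c => (pvExts c).foldl
        (fun t e => if PySem.Set.contains pvCodeExts e then PySem.Set.add t e else t) all)
      PySem.Set.empty).Perm
      (pvCodeExts.filter
        (fun ext => commits.any (fun c => ((PySem.Dict.mk c).getD "extensions" []).contains ext))) := by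
    rw [List.perm_ext_iff_of_nodup hA hB]
    intro a
    rw [pvA_mem, List.mem_filter]
    simp only [List.any_eq_true, List.contains_iff_mem]
    constructor
    · rintro (h | ⟨c, hc, h1, h2⟩)
      · cases h
      · exact ⟨h2, c, hc, h1⟩
    · rintro ⟨h2, c, hc, h1⟩
      exact Or.inr ⟨c, hc, h1, h2⟩
  exact hperm.length_eq
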